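-- pv_equiv track=rewrite | github.com/CYBORG-NIT-ROURKELA/Flipkart-Grid-Robotics-R2 | grid_arena_r2/src/fourbot_KJ.py | check_for_equal_destinations
-- ===== SOURCE A (Python) =====
-- def check_for_equal_destinations(final1, final2, final3, final4):
--     final = [final1, final2, final3, final4]
--     d = {}
--     for i in range(len(final)):
--         if final[i] not in d:
--             d[final[i]] = 1
--         else:
--             d[final[i]] += 1
--     for key in d:
--         if d[key] > 1:
--             return True
--     return False
-- ===== SOURCE B (Python) =====
-- def check_for_equal_destinations(final1, final2, final3, final4):
--     # Comparison-based: check the six unordered pairs directly; no dict/set.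
--     return (final1 == final2 or final1 == final3 or final1 == final4
--             or final2 == final3 or final2 == final4 or final3 == final4)
-- ===== Notes on version B (the rewrite author's own statement) =====
-- stated objective: simpler
-- what changed: Replaces A's hashed count-dictionary built by an index loop plus a second scan for a count > 1 with a container-free pairwise comparison: a single boolean disjunction over the six unordered pairs of the four values.
import Mathlib
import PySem

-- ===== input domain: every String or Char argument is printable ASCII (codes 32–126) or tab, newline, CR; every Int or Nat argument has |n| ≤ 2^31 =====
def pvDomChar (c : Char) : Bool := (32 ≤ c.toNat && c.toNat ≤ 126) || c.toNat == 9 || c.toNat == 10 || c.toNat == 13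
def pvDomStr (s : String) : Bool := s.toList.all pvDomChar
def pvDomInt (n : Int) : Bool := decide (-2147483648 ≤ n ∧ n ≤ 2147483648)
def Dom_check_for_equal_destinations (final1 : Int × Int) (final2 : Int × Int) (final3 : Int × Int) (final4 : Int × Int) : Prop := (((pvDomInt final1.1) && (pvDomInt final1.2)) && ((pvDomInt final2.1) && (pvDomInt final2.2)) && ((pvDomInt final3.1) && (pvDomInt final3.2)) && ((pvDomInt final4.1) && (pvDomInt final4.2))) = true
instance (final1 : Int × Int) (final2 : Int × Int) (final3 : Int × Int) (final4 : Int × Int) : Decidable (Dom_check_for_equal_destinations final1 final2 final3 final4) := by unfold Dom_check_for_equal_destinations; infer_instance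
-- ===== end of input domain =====

-- B replaces A's count-dictionary (index loop + scan for a count > 1) with a
-- container-free disjunction of the six pairwise equalities (objective: simpler).

-- ===== PORT A =====
def check_for_equal_destinations (final1 : Int × Int) (final2 : Int × Int) (final3 : Int × Int) (final4 : Int × Int) : Bool :=
  let final : List (Int × Int) := [final1, final2, final3, final4]
  let d : PySem.Dict (Int × Int) Int :=
    (PySem.List.pyRange 0 (PySem.List.len final) 1).foldl
      (fun d i =>
        -- 'final[i]' with i ∈ range(len(final)): in range, so pyGetD is exact here
        if (d.get? (PySem.List.pyGetD final i (0, 0))).isNone  -- final[i] not in d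
        then d.insert (PySem.List.pyGetD final i (0, 0)) 1     -- d[final[i]] = 1
        else d.modify (PySem.List.pyGetD final i (0, 0)) 0 (· + 1))  -- d[final[i]] += 1
      PySem.Dict.empty
  -- for key in d: if d[key] > 1: return True / return False
  (PySem.Dict.keys d).any (fun k => decide (PySem.Dict.getD d k 0 > 1))

-- ===== PORT B =====
def check_for_equal_destinations_alt (final1 : Int × Int) (final2 : Int × Int) (final3 : Int × Int) (final4 : Int × Int) : Bool :=
  decide (final1 = final2) || decide (final1 = final3) || decide (final1 = final4) ||
  decide (final2 = final3) || decide (final2 = final4) || decide (final3 = final4)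

-- ===== PRECONDITION & SPEC =====
def Spec_check_for_equal_destinations (final1 : Int × Int) (final2 : Int × Int) (final3 : Int × Int) (final4 : Int × Int) (out : Bool) : Prop := out = check_for_equal_destinations_alt final1 final2 final3 final4
instance (final1 : Int × Int) (final2 : Int × Int) (final3 : Int × Int) (final4 : Int × Int) (out : Bool) : Decidable (Spec_check_for_equal_destinations final1 final2 final3 final4 out) := by unfold Spec_check_for_equal_destinations; infer_instance

-- ===== CLAIM (what is proved, stated in full; the proofs are below) =====
def Claim_equal_check_for_equal_destinations : Prop := ∀ (final1 : Int × Int) (final2 : Int × Int) (final3 : Int × Int) (final4 : Int × Int), Dom_check_for_equal_destinations final1 final2 final3 final4 → Spec_check_for_equal_destinations final1 final2 final3 final4 (check_for_equal_destinations final1 final2 final3 final4)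

-- ===== LEMMAS AND PROOFS =====

-- A's loop body 'if final[i] not in d then d[x]=1 else d[x]+=1' is extensionally the counter step.
theorem pv_body_eq_counter_step :
    (fun (d : PySem.Dict (Int × Int) Int) (x : Int × Int) =>
      if (d.get? x).isNone then d.insert x 1 else d.modify x 0 (· + 1)) =
    (fun (d : PySem.Dict (Int × Int) Int) (x : Int × Int) => d.insert x (d.getD x 0 + 1)) := by
  funext d x
  cases h : d.get? x <;> simp [PySem.Dict.modify, PySem.Dict.getD, h]

-- A computes Counter(final) and asks for a count > 1.
theorem pv_A_eq_any_count (f1 f2 f3 f4 : Int × Int) :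
    check_for_equal_destinations f1 f2 f3 f4 =
      (PySem.Set.ofList [f1, f2, f3, f4]).any
        (fun k => decide (1 < List.count k [f1, f2, f3, f4])) := by
  simp only [check_for_equal_destinations]
  have h := PySem.List.foldl_pyRange_zero_pyGetD [f1, f2, f3, f4] ((0 : Int), (0 : Int))
        (fun (d : PySem.Dict (Int × Int) Int) x =>
          if (d.get? x).isNone then d.insert x 1 else d.modify x 0 (· + 1))
        PySem.Dict.empty
  beta_reduce at h
  rw [h,
      pv_body_eq_counter_step,
      PySem.Dict.foldl_insert_getD_add_one_eq_counter,
      PySem.Dict.keys_counter]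
  simp [PySem.Dict.getD_counter]

-- ===== VERDICT (by name: the statement is the Claim_ definition above) =====
theorem check_for_equal_destinations_spec : Claim_equal_check_for_equal_destinations := by
  intro f1 f2 f3 f4 _
  unfold Spec_check_for_equal_destinations check_for_equal_destinations_alt
  rw [pv_A_eq_any_count, Bool.eq_iff_iff]
  simp only [List.any_eq_true, PySem.Set.mem_ofList, decide_eq_true_eq, Bool.or_eq_true]
  constructor
  · rintro ⟨k, hk, hc⟩
    have hnd : ¬ ([f1, f2, f3, f4].Nodup) := fun hn =>
      absurd (List.nodup_iff_count_le_one.mp hn k) (by omega)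
    simp only [List.nodup_cons, List.mem_cons, List.nodup_nil,
      and_true, not_and, not_not] at hnd
    tauto
  · intro h
    have hnd : ¬ ([f1, f2, f3, f4].Nodup) := by
      simp only [List.nodup_cons, List.mem_cons, List.nodup_nil,
        and_true, not_and, not_not]
      tauto
    rw [List.nodup_iff_count_le_one] at hnd
    push Not at hnd
    obtain ⟨k, hk⟩ := hnd
    refine ⟨k, ?_, by omega⟩
    by_contra hmem
    have : List.count k [f1, f2, f3, f4] = 0 := List.count_eq_zero.mpr hmem
    omega
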